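-- pv_equiv track=rewrite | github.com/aronalee/coding_test | python/programmers/후보키.py | create_super_keys
-- ===== SOURCE A (Python) =====
-- from itertools import combinations
--
-- def check_super_key(key, relation):
--     s = set()
--     for row in relation:
--         fields = str([row[attr] for attr in key])
--         if fields in s:
--             return False
--         s.add(fields)
--     return True
--
-- def create_super_keys(relation):
--     super_keys = []
--     keys = [i for i in range(len(relation[0]))]
--     for i in range(1, len(keys) + 1):
--         for key in combinations(keys, i):
--             if check_super_key(key, relation):
--                 super_keys.append(set(key))
--     return super_keys
-- ===== SOURCE B (Python) =====
-- from itertools import combinations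
--
-- def has_unique_projection(key, relation):
--     projs = sorted(str([row[a] for a in key]) for row in relation)
--     return all(x != y for x, y in zip(projs, projs[1:]))
--
-- def create_super_keys(relation):
--     n = len(relation[0])
--     return [set(key)
--             for i in range(1, n + 1)
--             for key in combinations(range(n), i)
--             if has_unique_projection(key, relation)]
-- ===== Notes on version B (the rewrite author's own statement) =====
-- stated objective: alternative
-- what changed: Per-candidate-key uniqueness is decided by sorting the projection fingerprints and checking adjacent pairs instead of A's incremental hash-set scan with early exit, and the result list is built as one comprehension over filtered combinations instead of A's nested accumulator loops.
-- outside the precondition, e.g. on create_super_keys([['a', 'b'], ['a', 'b'], ['x']]): A returns [], B raises IndexError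
import Mathlib
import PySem

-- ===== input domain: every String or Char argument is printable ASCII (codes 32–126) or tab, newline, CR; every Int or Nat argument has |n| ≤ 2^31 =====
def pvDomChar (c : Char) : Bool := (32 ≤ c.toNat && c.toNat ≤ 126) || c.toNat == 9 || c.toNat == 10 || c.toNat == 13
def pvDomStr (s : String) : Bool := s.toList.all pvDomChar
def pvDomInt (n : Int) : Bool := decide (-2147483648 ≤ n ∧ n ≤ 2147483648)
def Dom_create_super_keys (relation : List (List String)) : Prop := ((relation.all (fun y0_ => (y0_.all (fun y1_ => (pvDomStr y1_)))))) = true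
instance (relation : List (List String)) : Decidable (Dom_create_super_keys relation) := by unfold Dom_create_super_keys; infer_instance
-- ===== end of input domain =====

-- B replaces A's per-key incremental hash-set duplicate scan (with early exit) by sort-the-fingerprints-and-
-- compare-adjacent, and builds the result as one comprehension over filtered combinations (objective: alternative).

-- ===== PORT A =====
-- shared helper: Python's repr of an ASCII string (exact on printable ASCII plus tab/newline/CR:
-- quote choice, backslash/quote escaping, \t \n \r); both Pythons compute str([...]) of the projected cells
def pyreprChars (cs : List Char) : List Char :=
  let q : Char := if cs.contains '\'' && !cs.contains '"' then '"' else '\''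
  q :: cs.flatMap (fun c =>
    if c = '\\' then ['\\', '\\']
    else if c = '\t' then ['\\', 't']
    else if c = '\n' then ['\\', 'n']
    else if c = '\r' then ['\\', 'r']
    else if c = q then ['\\', q]
    else [c]) ++ [q]

-- shared helper: str(list_of_strings) — "[" + ", ".join(repr(x) for x) + "]"
-- fields = str([row[attr] for attr in key]); row[attr] total form, exact under Pre_
def rowFields (key : List Int) (row : List String) : String :=
  String.ofList ('[' :: PySem.Chars.join [',', ' '] (key.map (fun attr => pyreprChars (PySem.List.pyGetD row attr "").toList)) ++ [']'])

-- the row loop of check_super_key: s is the Python set of already-seen fingerprints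
def cskLoop (key : List Int) : List (List String) → PySem.Set String → Bool
  | [], _ => true
  | row :: rest, s =>
    let fields := rowFields key row
    if fields ∈ s then false
    else cskLoop key rest (PySem.Set.add s fields)

def check_super_key (key : List Int) (relation : List (List String)) : Bool :=
  cskLoop key relation PySem.Set.empty

def create_super_keys (relation : List (List String)) : List (List Int) :=
  let keys : List Int := PySem.List.pyRange 0 (PySem.List.len (PySem.List.pyGetD relation 0 [])) 1
  (PySem.List.pyRange 1 (PySem.List.len keys + 1) 1).foldl (fun super_keys i =>
    (PySem.List.combinations keys i.toNat).foldl (fun super_keys key =>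
      if check_super_key key relation then super_keys ++ [PySem.Set.ofList key] else super_keys)
      super_keys) []

-- ===== PORT B =====
def has_unique_projection (key : List Int) (relation : List (List String)) : Bool :=
  let projs := PySem.List.sorted (relation.map (fun row => rowFields key row)) (fun x => x) false
  (projs.zip (PySem.List.slice projs (some 1) none)).all (fun p => decide (p.1 ≠ p.2))

def create_super_keys_alt (relation : List (List String)) : List (List Int) :=
  let n := PySem.List.len (PySem.List.pyGetD relation 0 [])
  (PySem.List.pyRange 1 (n + 1) 1).flatMap (fun i =>
    ((PySem.List.combinations (PySem.List.pyRange 0 n 1) i.toNat).filter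
      (fun key => has_unique_projection key relation)).map (fun key => PySem.Set.ofList key))

-- ===== PRECONDITION & SPEC =====
-- Pre_ excludes the empty relation and ragged relations (a row shorter than the first row), on which the
-- Pythons raise IndexError — except the accidental corner where an earlier duplicate stops A's row scan
-- before every out-of-range access, where A returns but B still raises (example cited in claim.json).
def Pre_create_super_keys (relation : List (List String)) : Prop :=
  relation ≠ [] ∧ ∀ row ∈ relation, (relation.headD []).length ≤ row.length
instance (relation : List (List String)) : Decidable (Pre_create_super_keys relation) := by unfold Pre_create_super_keys; infer_instance
def pvWitness_create_super_keys : List (List String) := [["a", "b"], ["a", "c"]]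

def Spec_create_super_keys (relation : List (List String)) (out : List (List Int)) : Prop := out = create_super_keys_alt relation
instance (relation : List (List String)) (out : List (List Int)) : Decidable (Spec_create_super_keys relation out) := by unfold Spec_create_super_keys; infer_instance

-- ===== CLAIM (what is proved, stated in full; the proofs are below) =====
def Claim_equal_create_super_keys : Prop := ∀ (relation : List (List String)), Dom_create_super_keys relation → Pre_create_super_keys relation → Spec_create_super_keys relation (create_super_keys relation)

-- ===== LEMMAS AND PROOFS =====

-- on a ≤-sorted list, "no two adjacent elements are equal" is exactly Nodup
theorem adjacent_ne_iff_nodup (l : List String) (hs : l.Pairwise (· ≤ ·)) :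
    ((l.zip l.tail).all (fun p => decide (p.1 ≠ p.2)) = true) ↔ l.Nodup := by
  induction l with
  | nil => simp
  | cons x t ih =>
    have hxt : ∀ y ∈ t, x ≤ y := fun y hy => (List.pairwise_cons.mp hs).1 y hy
    have ht : t.Pairwise (· ≤ ·) := (List.pairwise_cons.mp hs).2
    cases t with
    | nil => simp
    | cons y t' =>
      have ih' := ih ht
      simp only [List.tail_cons] at ih'
      simp only [List.tail_cons, List.zip_cons_cons, List.all_cons, Bool.and_eq_true,
        decide_eq_true_eq, List.nodup_cons]
      rw [ih']
      constructor
      · rintro ⟨hxy, hnd⟩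
        refine ⟨?_, List.nodup_cons.mp hnd⟩
        intro hxmem
        rcases List.mem_cons.mp hxmem with h | h
        · exact hxy (h ▸ rfl)
        · -- x ∈ t' : then y ≤ x and x ≤ y force x = y, contradicting x ≠ y
          have hyx : y ≤ x := (List.pairwise_cons.mp ht).1 x h
          have hxy' : x ≤ y := hxt y (List.mem_cons_self)
          exact hxy (le_antisymm hxy' hyx)
      · rintro ⟨hxnot, hnd⟩
        exact ⟨fun h => hxnot (h ▸ List.mem_cons_self), List.nodup_cons.mpr hnd⟩

theorem hup_iff (key : List Int) (relation : List (List String)) :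
    has_unique_projection key relation = true ↔ (relation.map (fun row => rowFields key row)).Nodup := by
  simp only [has_unique_projection, PySem.List.slice_from_one]
  rw [adjacent_ne_iff_nodup _ (PySem.List.sorted_pairwise _ _),
    (PySem.List.sorted_perm _ _ _).nodup_iff]

theorem cskLoop_iff (key : List Int) (rows : List (List String)) (s : PySem.Set String) :
    cskLoop key rows s = true ↔
      ((rows.map (fun row => rowFields key row)).Nodup ∧ ∀ r ∈ rows, rowFields key r ∉ s) := by
  induction rows generalizing s with
  | nil => simp [cskLoop]
  | cons row rest ih =>
    by_cases h : rowFields key row ∈ s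
    · simp only [cskLoop, if_pos h]
      simp only [List.map_cons, List.nodup_cons, List.mem_cons]
      constructor
      · intro hfalse; cases hfalse
      · rintro ⟨-, hall⟩
        exact absurd h (hall row (Or.inl rfl))
    · simp only [cskLoop, if_neg h]
      rw [ih]
      simp only [List.map_cons, List.nodup_cons, List.mem_cons, List.mem_map]
      constructor
      · rintro ⟨hnd, hall⟩
        refine ⟨⟨?_, hnd⟩, ?_⟩
        · rintro ⟨r, hr, heq⟩
          have := hall r hr
          rw [PySem.Set.mem_add] at this
          exact this (Or.inr heq)
        · rintro r (rfl | hr)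
          · exact h
          · intro hmem
            have := hall r hr
            rw [PySem.Set.mem_add] at this
            exact this (Or.inl hmem)
      · rintro ⟨⟨hnotin, hnd⟩, hall⟩
        refine ⟨hnd, ?_⟩
        intro r hr
        rw [PySem.Set.mem_add]
        rintro (hmem | heq)
        · exact hall r (Or.inr hr) hmem
        · exact hnotin ⟨r, hr, heq⟩

theorem check_eq (key : List Int) (relation : List (List String)) :
    check_super_key key relation = has_unique_projection key relation := by
  rw [Bool.eq_iff_iff, check_super_key, cskLoop_iff, hup_iff]
  simp [PySem.Set.empty]

theorem ports_eq (relation : List (List String)) :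
    create_super_keys relation = create_super_keys_alt relation := by
  unfold create_super_keys create_super_keys_alt
  have h0 : (0 : Int) ≤ PySem.List.len (PySem.List.pyGetD relation 0 []) := by
    simp [PySem.List.len]
  have hlen : PySem.List.len (PySem.List.pyRange 0 (PySem.List.len (PySem.List.pyGetD relation 0 [])) 1)
      = PySem.List.len (PySem.List.pyGetD relation 0 []) := by
    simp only [PySem.List.len_eq, PySem.List.length_pyRange_one]
    omega
  simp only [PySem.List.foldl_append_if, PySem.List.foldl_append_eq_flatMap, List.nil_append,
    check_eq, hlen]

-- ===== VERDICT (by name: the statement is the Claim_ definition above) =====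
theorem create_super_keys_spec : Claim_equal_create_super_keys := by
  intro relation _ _
  exact ports_eq relation
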